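-- pv_equiv track=rewrite | github.com/Rupert-WLLP-Bai/HKU-CS | Semester 2/COMP7404D - Computational intelligence and machine learning/a2/p3.py | extract_board_state
-- ===== SOURCE A (Python) =====
-- def extract_board_state(layout):
--     pacman_position = None
--     ghost_positions = {}
--     food_positions = []
--     wall_positions = []
--     board_size = (len(layout), len(layout[0]))
--
--     for i in range(len(layout)):
--         for j in range(len(layout[i])):
--             if layout[i][j] == 'P':
--                 pacman_position = (i, j)
--             elif layout[i][j] in 'WXYZ':
--                 ghost_positions[layout[i][j]] = (i, j)
--             elif layout[i][j] == '.':
--                 food_positions.append((i, j))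
--             elif layout[i][j] == '%':
--                 wall_positions.append((i, j))
--
--     return pacman_position, ghost_positions, food_positions, wall_positions, board_size
-- ===== SOURCE B (Python) =====
-- def extract_board_state(layout):
--     cells = [(c, (i, j)) for i, row in enumerate(layout) for j, c in enumerate(row)]
--     pacmans = [pos for c, pos in cells if c == 'P']
--     pacman_position = pacmans[-1] if pacmans else None
--     ghost_positions = {c: pos for c, pos in cells if c in 'WXYZ'}
--     food_positions = [pos for c, pos in cells if c == '.']
--     wall_positions = [pos for c, pos in cells if c == '%']
--     return pacman_position, ghost_positions, food_positions, wall_positions, (len(layout), len(layout[0]))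
-- ===== Notes on version B (the rewrite author's own statement) =====
-- stated objective: alternative
-- what changed: Replaces the single nested loop that dispatches each cell through an if/elif chain into four mutable containers by one flattened cell enumeration followed by independent per-category scans (last-P selection, a ghost dict comprehension, and two filter passes).
import Mathlib
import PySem

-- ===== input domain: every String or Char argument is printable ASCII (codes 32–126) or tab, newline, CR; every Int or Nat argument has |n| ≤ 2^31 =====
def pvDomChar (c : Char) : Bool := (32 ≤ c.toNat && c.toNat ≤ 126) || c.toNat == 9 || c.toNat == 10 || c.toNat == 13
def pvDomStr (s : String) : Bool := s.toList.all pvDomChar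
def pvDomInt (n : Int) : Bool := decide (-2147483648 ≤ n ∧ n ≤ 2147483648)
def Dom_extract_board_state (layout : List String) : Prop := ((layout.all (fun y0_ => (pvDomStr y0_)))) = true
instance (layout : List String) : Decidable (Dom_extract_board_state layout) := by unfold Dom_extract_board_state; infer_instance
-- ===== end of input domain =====

-- B replaces A's single classify-as-you-go nested loop by a flattened cell list and
-- independent per-category scans; same results, no speed claim (objective: alternative).

-- ===== PORT A =====
-- loop state: (pacman_position, ghost_positions, food_positions, wall_positions)
def pvStateA := Option (Int × Int) × PySem.Dict String (Int × Int) × List (Int × Int) × List (Int × Int)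

-- body of A's inner loop: the if/elif chain on layout[i][j]
def pvStepA (st : pvStateA) (c : Char) (pos : Int × Int) : pvStateA :=
  if c = 'P' then (some pos, st.2.1, st.2.2.1, st.2.2.2)
  else if c = 'W' ∨ c = 'X' ∨ c = 'Y' ∨ c = 'Z' then
    (st.1, st.2.1.insert (String.ofList [c]) pos, st.2.2.1, st.2.2.2)
  else if c = '.' then (st.1, st.2.1, st.2.2.1 ++ [pos], st.2.2.2)
  else if c = '%' then (st.1, st.2.1, st.2.2.1, st.2.2.2 ++ [pos])
  else st

-- A's nested for-loop, as a fold over (row, i) then (char, j)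
def pvFoldA (layout : List String) : pvStateA :=
  layout.zipIdx.foldl (fun st ri =>
    ri.1.toList.zipIdx.foldl (fun st cj => pvStepA st cj.1 ((ri.2 : Int), (cj.2 : Int))) st)
    (none, PySem.Dict.empty, [], [])

def extract_board_state (layout : List String) : (Option (Int × Int)) × (List (String × Int × Int)) × (List (Int × Int)) × (List (Int × Int)) × (Int × Int) :=
  ((pvFoldA layout).1, (pvFoldA layout).2.1.items, (pvFoldA layout).2.2.1, (pvFoldA layout).2.2.2,
   ((layout.length : Int), PySem.Str.len (layout.headD "")))

-- ===== PORT B =====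
-- the flattened cell list [(c, (i, j)) …] in row-major order
def pvCells (layout : List String) : List (Char × Int × Int) :=
  layout.zipIdx.flatMap (fun ri =>
    ri.1.toList.zipIdx.map (fun cj => (cj.1, (ri.2 : Int), (cj.2 : Int))))

def pvIsGhost (c : Char) : Bool := c == 'W' || c == 'X' || c == 'Y' || c == 'Z'

def extract_board_state_alt (layout : List String) : (Option (Int × Int)) × (List (String × Int × Int)) × (List (Int × Int)) × (List (Int × Int)) × (Int × Int) :=
  ((((pvCells layout).filter (fun t => t.1 == 'P')).map (fun t => t.2)).getLast?,
   (((pvCells layout).filter (fun t => pvIsGhost t.1)).foldl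
      (fun d t => d.insert (String.ofList [t.1]) t.2) PySem.Dict.empty).items,
   ((pvCells layout).filter (fun t => t.1 == '.')).map (fun t => t.2),
   ((pvCells layout).filter (fun t => t.1 == '%')).map (fun t => t.2),
   ((layout.length : Int), PySem.Str.len (layout.headD "")))

-- ===== PRECONDITION & SPEC =====
-- Pre_ excludes only the empty layout, on which A raises IndexError at layout[0].
def Pre_extract_board_state (layout : List String) : Prop := layout ≠ []
instance (layout : List String) : Decidable (Pre_extract_board_state layout) := by unfold Pre_extract_board_state; infer_instance
def pvWitness_extract_board_state : List String := ["P.%", "W X"]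

def Spec_extract_board_state (layout : List String) (out : (Option (Int × Int)) × (List (String × Int × Int)) × (List (Int × Int)) × (List (Int × Int)) × (Int × Int)) : Prop := out = extract_board_state_alt layout
instance (layout : List String) (out : (Option (Int × Int)) × (List (String × Int × Int)) × (List (Int × Int)) × (List (Int × Int)) × (Int × Int)) : Decidable (Spec_extract_board_state layout out) := by unfold Spec_extract_board_state; infer_instance

-- ===== CLAIM (what is proved, stated in full; the proofs are below) =====
def Claim_equal_extract_board_state : Prop := ∀ (layout : List String), Dom_extract_board_state layout → Pre_extract_board_state layout → Spec_extract_board_state layout (extract_board_state layout)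

-- ===== LEMMAS AND PROOFS =====

-- folding over a flatMap = folding the inner folds
theorem pv_foldl_flatMap {α β γ : Type} (g : β → List γ) (f : α → γ → α) (l : List β) (a : α) :
    (l.flatMap g).foldl f a = l.foldl (fun a b => (g b).foldl f a) a := by
  induction l generalizing a with
  | nil => rfl
  | cons x xs ih => simp [List.flatMap_cons, List.foldl_append, ih]

-- "last write wins" fold equals getLast? with fallback
theorem pv_foldl_last {α : Type} (l : List α) (p : Option α) :
    l.foldl (fun _ x => some x) p = l.getLast?.or p := by
  induction l generalizing p with
  | nil => rfl
  | cons x xs ih =>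
    simp only [List.foldl_cons, ih]
    cases xs with
    | nil => rfl
    | cons y ys =>
      rw [List.getLast?_cons_cons]
      cases h : (y :: ys).getLast? with
      | none => simp [List.getLast?_eq_none_iff] at h
      | some z => rfl

-- the loop invariant: A's combined fold over any cell list, from any state,
-- decomposes into the four independent per-category scans of B
theorem pv_fold_decompose (cs : List (Char × Int × Int)) (st : pvStateA) :
    cs.foldl (fun st t => pvStepA st t.1 t.2) st =
      (((cs.filter (fun t => t.1 == 'P')).map (fun t => t.2)).foldl (fun _ x => some x) st.1,
       (cs.filter (fun t => pvIsGhost t.1)).foldl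
         (fun d t => d.insert (String.ofList [t.1]) t.2) st.2.1,
       st.2.2.1 ++ (cs.filter (fun t => t.1 == '.')).map (fun t => t.2),
       st.2.2.2 ++ (cs.filter (fun t => t.1 == '%')).map (fun t => t.2)) := by
  induction cs generalizing st with
  | nil => simp
  | cons t ts ih =>
    obtain ⟨c, pos⟩ := t
    rw [List.foldl_cons, ih]
    simp only [List.filter_cons]
    by_cases hP : c = 'P'
    · subst hP
      simp [pvStepA, pvIsGhost]
    · by_cases hG : c = 'W' ∨ c = 'X' ∨ c = 'Y' ∨ c = 'Z'
      · rcases hG with h|h|h|h <;> subst h <;> simp [pvStepA, pvIsGhost]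
      · have hg : pvIsGhost c = false := by
          unfold pvIsGhost; push Not at hG
          simp [hG.1, hG.2.1, hG.2.2.1, hG.2.2.2]
        have hP' : (c == 'P') = false := by simp [hP]
        by_cases hF : c = '.'
        · subst hF
          simp [pvStepA, hg]
        · by_cases hW : c = '%'
          · subst hW
            simp [pvStepA, hg]
          · simp [pvStepA, hP', hP, hG, hg, hF, hW]

-- A's nested loop is the fold of pvStepA over the flattened cells
theorem pv_nested_eq_cells (layout : List String) :
    pvFoldA layout =
    (pvCells layout).foldl (fun st t => pvStepA st t.1 t.2)
      ((none, PySem.Dict.empty, [], []) : pvStateA) := by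
  rw [pvFoldA, pvCells, pv_foldl_flatMap]
  congr 1
  funext st ri
  rw [List.foldl_map]

-- ===== VERDICT (by name: the statement is the Claim_ definition above) =====
theorem extract_board_state_spec : Claim_equal_extract_board_state := by
  intro layout _ _
  unfold Spec_extract_board_state extract_board_state extract_board_state_alt
  rw [pv_nested_eq_cells, pv_fold_decompose]
  simp [pv_foldl_last]
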